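-- pv_equiv track=rewrite | github.com/yoon570/chet_vis | bse_static_dynamic_unified.py | replace_byte
-- ===== SOURCE A (Python) =====
-- def replace_byte(page, byte, replacement, literal_escape):
--     new_page = []
--     idx = 0
--     if literal_escape in replacement:
--         new_replacement = []
--         index = 0
--         while index < len(replacement):
--             if replacement[index] == literal_escape and replacement[index + 1] == byte:
--                 new_replacement.append(byte)
--                 index += 1
--             else:
--                 new_replacement.append(replacement[index])
--             index += 1
--         replacement = new_replacement
--     while idx < len(page):
--         if page[idx] == byte:
--             new_page.extend(replacement)
--
--         elif page[idx] == literal_escape and page[idx + 1] == byte: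
--             # effectively remove one lit escape
--             new_page.append(byte)
--             idx += 1
--         else:
--             new_page.append(page[idx])
--         idx += 1
--     return new_page
-- ===== SOURCE B (Python) =====
-- def replace_byte(page, byte, replacement, literal_escape):
--     # Split-and-join instead of an element-wise scan: split on occurrences of
--     # the escape pair [literal_escape, byte] (leftmost, non-overlapping), then
--     # inside each segment replace bare bytes by splitting on byte and joining
--     # with the expansion, and finally rejoin the segments with a literal byte.
--     def split_on(seq, x):
--         segs, cur = [], []
--         for v in seq:
--             if v == x:
--                 segs.append(cur)
--                 cur = []
--             else:
--                 cur.append(v)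
--         segs.append(cur)
--         return segs
--
--     def join(segs, sep):
--         out = list(segs[0])
--         for s in segs[1:]:
--             out += sep + s
--         return out
--
--     def find_pair(seq):
--         for i in range(len(seq) - 1):
--             if seq[i] == literal_escape and seq[i + 1] == byte:
--                 return i
--         return -1
--
--     def split_pairs(seq):
--         segs = []
--         while True:
--             i = find_pair(seq)
--             if i < 0:
--                 break
--             segs.append(seq[:i])
--             seq = seq[i + 2:]
--         segs.append(seq)
--         return segs
--
--     def subst(seq, expand):
--         segs = split_pairs(seq) if literal_escape != byte else [seq]
--         return join([join(split_on(seg, byte), expand) for seg in segs], [byte])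
--
--     return subst(page, subst(replacement, [byte]))
-- ===== Notes on version B (the rewrite author's own statement) =====
-- stated objective: alternative
-- what changed: A's element-wise lookahead scans are replaced by a split-and-join algorithm: the sequence is split on occurrences of the two-element escape pair (leftmost, non-overlapping), each segment is split on the byte and joined with the expansion, and the segments are rejoined with a literal byte.
-- outside the precondition, e.g. on replace_byte([5], 5, [5, 5], 5): A returns [5], B returns [5, 5]
-- crash fix: A raises IndexError when a literal_escape that needs a following element falls on the last position of page or of the replacement being preprocessed; B's split-and-join simply keeps the dangling escape literal and returns the translated list. — e.g. on replace_byte([7, 99], 5, [1], 99): A raises IndexError, B returns [7, 99]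
import Mathlib
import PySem

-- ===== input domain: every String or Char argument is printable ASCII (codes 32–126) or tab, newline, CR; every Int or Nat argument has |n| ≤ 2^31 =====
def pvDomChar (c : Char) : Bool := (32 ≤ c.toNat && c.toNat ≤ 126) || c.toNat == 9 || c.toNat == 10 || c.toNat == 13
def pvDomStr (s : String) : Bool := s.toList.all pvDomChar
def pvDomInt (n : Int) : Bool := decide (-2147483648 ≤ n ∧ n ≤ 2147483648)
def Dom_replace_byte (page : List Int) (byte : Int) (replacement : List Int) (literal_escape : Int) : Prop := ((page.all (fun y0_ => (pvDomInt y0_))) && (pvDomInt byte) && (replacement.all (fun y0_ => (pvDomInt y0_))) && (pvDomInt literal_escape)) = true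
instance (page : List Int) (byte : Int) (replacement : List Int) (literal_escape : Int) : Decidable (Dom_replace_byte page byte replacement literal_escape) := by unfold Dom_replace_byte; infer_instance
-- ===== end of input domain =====

-- B replaces A's element-wise lookahead scans by a split-and-join algorithm
-- (split on the escape pair, replace bytes per segment, rejoin); same asymptotic
-- cost, no speed claim.

-- ===== PORT A =====
-- A's preprocessing while-loop over `replacement` (index-based, lookahead at index+1).
-- `r[index+1]?` is Python's replacement[index+1] on a nonnegative index; `none` is the
-- IndexError path (Python raises there; the returned `acc` is never relied on inside Pre_).
def pvAPrep (r : List Int) (byte esc : Int) : Nat → Nat → List Int → List Int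
  | 0, _, acc => acc  -- fuel exhausted (never reached: called with fuel = r.length)
  | fuel+1, index, acc =>
    if h : index < r.length then
      if r[index] = esc then
        match r[index+1]? with
        | none => acc  -- Python: IndexError
        | some y =>
          if y = byte then pvAPrep r byte esc fuel (index+2) (acc ++ [byte])
          else pvAPrep r byte esc fuel (index+1) (acc ++ [r[index]])
      else pvAPrep r byte esc fuel (index+1) (acc ++ [r[index]])
    else acc

-- A's main while-loop over `page` (fuel = page.length makes the same recursion structural).
def pvAMain (page : List Int) (byte : Int) (rep : List Int) (esc : Int) : Nat → Nat → List Int → List Int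
  | 0, _, acc => acc  -- fuel exhausted (never reached: called with fuel = page.length)
  | fuel+1, idx, acc =>
    if h : idx < page.length then
      if page[idx] = byte then pvAMain page byte rep esc fuel (idx+1) (acc ++ rep)
      else if page[idx] = esc then
        match page[idx+1]? with
        | none => acc  -- Python: IndexError
        | some y =>
          if y = byte then pvAMain page byte rep esc fuel (idx+2) (acc ++ [byte])
          else pvAMain page byte rep esc fuel (idx+1) (acc ++ [page[idx]])
      else pvAMain page byte rep esc fuel (idx+1) (acc ++ [page[idx]])
    else acc

def replace_byte (page : List Int) (byte : Int) (replacement : List Int) (literal_escape : Int) : List Int :=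
  let rep := if literal_escape ∈ replacement
             then pvAPrep replacement byte literal_escape replacement.length 0 []
             else replacement
  pvAMain page byte rep literal_escape page.length 0 []

-- ===== PORT B =====
-- B's split_on: for-loop with (segs, cur) accumulator.
def pvSplitOn (x : Int) (seq : List Int) : List (List Int) :=
  let st := seq.foldl
    (fun (s : List (List Int) × List Int) v =>
      if v = x then (s.1 ++ [s.2], []) else (s.1, s.2 ++ [v]))
    ([], [])
  st.1 ++ [st.2]

-- B's join: out = segs[0]; for s in segs[1:]: out += sep + s.
-- B never calls it on an empty list (Python segs[0] would raise there).
def pvJoin (segs : List (List Int)) (sep : List Int) : List Int :=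
  match segs with
  | [] => []
  | s0 :: rest => rest.foldl (fun out s => out ++ sep ++ s) s0

-- B's find_pair: for i in range(len(seq)-1): … return i / return -1 (fuel = remaining indices).
def pvFindPairAux (esc byte : Int) (seq : List Int) : Nat → Nat → Int
  | 0, _ => -1
  | fuel+1, i =>
    if i + 1 < seq.length then
      if seq.getD i 0 = esc ∧ seq.getD (i+1) 0 = byte then (i : Int)
      else pvFindPairAux esc byte seq fuel (i+1)
    else -1

def pvFindPair (esc byte : Int) (seq : List Int) : Int :=
  pvFindPairAux esc byte seq seq.length 0

-- B's split_pairs while-loop (each iteration shortens seq; fuel = seq.length suffices).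
def pvSplitPairsAux (esc byte : Int) : Nat → List Int → List (List Int) → List (List Int)
  | 0, seq, segs => segs ++ [seq]  -- fuel exhausted (never reached)
  | fuel+1, seq, segs =>
    let i := pvFindPair esc byte seq
    if i < 0 then segs ++ [seq]
    else pvSplitPairsAux esc byte fuel (seq.drop (i.toNat + 2)) (segs ++ [seq.take i.toNat])

def pvSplitPairs (esc byte : Int) (seq : List Int) : List (List Int) :=
  pvSplitPairsAux esc byte seq.length seq []

-- B's subst.
def pvSubst (byte esc : Int) (seq expand : List Int) : List Int :=
  let segs := if esc ≠ byte then pvSplitPairs esc byte seq else [seq]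
  pvJoin (segs.map (fun seg => pvJoin (pvSplitOn byte seg) expand)) [byte]

def replace_byte_alt (page : List Int) (byte : Int) (replacement : List Int) (literal_escape : Int) : List Int :=
  pvSubst byte literal_escape page (pvSubst byte literal_escape replacement [byte])

-- ===== PRECONDITION & SPEC =====
-- Pre_ excludes (a) inputs where A raises IndexError: a literal_escape needing a following
-- element on the last position of page or of the replacement being preprocessed; and
-- (b) the degenerate configuration literal_escape = byte with the escape occurring in the
-- replacement, where A's two loops apply opposite branch priorities (the preprocessing loop
-- collapses byte pairs while the main loop expands them) — an accidental behaviour on a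
-- corner no caller would specify; B treats byte uniformly as the replacement target.
def Pre_replace_byte (page : List Int) (byte : Int) (replacement : List Int) (literal_escape : Int) : Prop :=
  (literal_escape ∈ replacement →
     (literal_escape ≠ byte ∧ replacement.getLast? ≠ some literal_escape)) ∧
  (literal_escape = byte ∨ page.getLast? ≠ some literal_escape)
instance (page : List Int) (byte : Int) (replacement : List Int) (literal_escape : Int) : Decidable (Pre_replace_byte page byte replacement literal_escape) := by unfold Pre_replace_byte; infer_instance

def pvWitness_replace_byte : List Int × Int × List Int × Int := ([1, 99, 5, 2], 5, [8, 9], 99)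

-- A raises IndexError when a literal_escape that needs a following element falls on the last
-- position of page or of the preprocessed replacement; B's split-and-join simply keeps the
-- dangling escape literal and returns the translated list.
def Raises_replace_byte (page : List Int) (byte : Int) (replacement : List Int) (literal_escape : Int) : Prop :=
  (literal_escape = byte ∧
     (replacement.reverse.takeWhile (fun x => x == literal_escape)).length % 2 = 1) ∨
  (literal_escape ≠ byte ∧
     (page.getLast? = some literal_escape ∨
      (literal_escape ∈ replacement ∧ replacement.getLast? = some literal_escape)))
instance (page : List Int) (byte : Int) (replacement : List Int) (literal_escape : Int) : Decidable (Raises_replace_byte page byte replacement literal_escape) := by unfold Raises_replace_byte; infer_instance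

def pvRaiseWitness_replace_byte : List Int × Int × List Int × Int := ([7, 99], 5, [1], 99)
def pvRaiseWitnessOut_replace_byte : List Int := [7, 99]

def Spec_replace_byte (page : List Int) (byte : Int) (replacement : List Int) (literal_escape : Int) (out : List Int) : Prop := out = replace_byte_alt page byte replacement literal_escape
instance (page : List Int) (byte : Int) (replacement : List Int) (literal_escape : Int) (out : List Int) : Decidable (Spec_replace_byte page byte replacement literal_escape out) := by unfold Spec_replace_byte; infer_instance

-- ===== CLAIM (what is proved, stated in full; the proofs are below) =====
def Claim_equal_replace_byte : Prop := ∀ (page : List Int) (byte : Int) (replacement : List Int) (literal_escape : Int), Dom_replace_byte page byte replacement literal_escape → Pre_replace_byte page byte replacement literal_escape → Spec_replace_byte page byte replacement literal_escape (replace_byte page byte replacement literal_escape)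

def Claim_raises_replace_byte : Prop := (∀ (page : List Int) (byte : Int) (replacement : List Int) (literal_escape : Int), Dom_replace_byte page byte replacement literal_escape → Raises_replace_byte page byte replacement literal_escape → ¬ Pre_replace_byte page byte replacement literal_escape) ∧ (Dom_replace_byte (pvRaiseWitness_replace_byte.1) (pvRaiseWitness_replace_byte.2.1) (pvRaiseWitness_replace_byte.2.2.1) (pvRaiseWitness_replace_byte.2.2.2) ∧ Raises_replace_byte (pvRaiseWitness_replace_byte.1) (pvRaiseWitness_replace_byte.2.1) (pvRaiseWitness_replace_byte.2.2.1) (pvRaiseWitness_replace_byte.2.2.2) ∧ replace_byte_alt (pvRaiseWitness_replace_byte.1) (pvRaiseWitness_replace_byte.2.1) (pvRaiseWitness_replace_byte.2.2.1) (pvRaiseWitness_replace_byte.2.2.2) = pvRaiseWitnessOut_replace_byte)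

-- ===== LEMMAS AND PROOFS =====

-- Reference form of the transformation: a two-symbol structural recursion.
-- Both ports are proved equal to it.
def pvBGo (byte esc : Int) (expand : List Int) : List Int → List Int
  | [] => []
  | x :: rest =>
    if x = byte then expand ++ pvBGo byte esc expand rest
    else if x = esc then
      match rest with
      | [] => [esc]
      | y :: rest' =>
        if y = byte then byte :: pvBGo byte esc expand rest'
        else esc :: pvBGo byte esc expand (y :: rest')
    else x :: pvBGo byte esc expand rest
termination_by l => l.length
decreasing_by all_goals simp

theorem pvBGo_nil (byte esc : Int) (expand : List Int) : pvBGo byte esc expand [] = [] := by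
  rw [pvBGo.eq_def]

theorem pvBGo_byte (byte esc : Int) (expand rest : List Int) :
    pvBGo byte esc expand (byte :: rest) = expand ++ pvBGo byte esc expand rest := by
  rw [pvBGo.eq_def]; simp

theorem pvBGo_esc_nil (byte esc : Int) (expand : List Int) (h : esc ≠ byte) :
    pvBGo byte esc expand [esc] = [esc] := by
  rw [pvBGo.eq_def]; simp [h]

theorem pvBGo_esc_byte (byte esc : Int) (expand rest : List Int) (h : esc ≠ byte) :
    pvBGo byte esc expand (esc :: byte :: rest) = byte :: pvBGo byte esc expand rest := by
  rw [pvBGo.eq_def]; simp [h]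

theorem pvBGo_esc_other (byte esc : Int) (expand rest : List Int) (y : Int) (h : esc ≠ byte)
    (hy : y ≠ byte) :
    pvBGo byte esc expand (esc :: y :: rest) = esc :: pvBGo byte esc expand (y :: rest) := by
  rw [pvBGo.eq_def]; simp [h, hy]

theorem pvBGo_other (byte esc : Int) (expand rest : List Int) (x : Int) (hb : x ≠ byte)
    (he : x ≠ esc) :
    pvBGo byte esc expand (x :: rest) = x :: pvBGo byte esc expand rest := by
  rw [pvBGo.eq_def]; simp [hb, he]

-- When the escape never occurs, the pass with expand = [byte] is the identity.
theorem pvBGo_id (byte esc : Int) (r : List Int) (hesc : esc ∉ r) :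
    pvBGo byte esc [byte] r = r := by
  induction r with
  | nil => simp [pvBGo_nil]
  | cons x rest ih =>
    have hxe : x ≠ esc := fun h => hesc (h ▸ List.mem_cons_self)
    have hrest : esc ∉ rest := fun h => hesc (List.mem_cons_of_mem _ h)
    by_cases hxb : x = byte
    · rw [hxb, pvBGo_byte, ih hrest]; rfl
    · rw [pvBGo_other _ _ _ _ _ hxb hxe, ih hrest]

-- expand-only pass (no escape handling), the per-segment meaning of B's split_on/join.
def pvExp (byte : Int) (expand : List Int) : List Int → List Int
  | [] => []
  | x :: r => if x = byte then expand ++ pvExp byte expand r else x :: pvExp byte expand r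

-- "no escape pair occurs in the list"
def pvNoPair (esc byte : Int) : List Int → Prop
  | [] => True
  | [_] => True
  | x :: y :: r => ¬(x = esc ∧ y = byte) ∧ pvNoPair esc byte (y :: r)

theorem pvNoPair_tail (esc byte x : Int) (r : List Int) (h : pvNoPair esc byte (x :: r)) :
    pvNoPair esc byte r := by
  match r with
  | [] => trivial
  | y :: r' => exact h.2

-- join lemmas
theorem pvJoin_singleton (c sep : List Int) : pvJoin [c] sep = c := rfl

theorem pvJoin_foldl_out (sep : List Int) (rest : List (List Int)) :
    ∀ (a b : List Int),
      rest.foldl (fun out s => out ++ sep ++ s) (a ++ b)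
        = a ++ rest.foldl (fun out s => out ++ sep ++ s) b := by
  induction rest with
  | nil => intro a b; rfl
  | cons m tail ih =>
    intro a b
    simp only [List.foldl_cons]
    rw [show a ++ b ++ sep ++ m = a ++ (b ++ sep ++ m) by simp [List.append_assoc], ih]

theorem pvJoin_cons (c sep : List Int) (M : List (List Int)) (hM : M ≠ []) :
    pvJoin (c :: M) sep = c ++ sep ++ pvJoin M sep := by
  match M with
  | [] => exact absurd rfl hM
  | m0 :: rest =>
    show (m0 :: rest).foldl (fun out s => out ++ sep ++ s) c = c ++ sep ++ pvJoin (m0 :: rest) sep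
    simp only [List.foldl_cons]
    have := pvJoin_foldl_out sep rest (c ++ sep) m0
    rw [List.append_assoc] at this ⊢
    rw [this]; rfl

theorem pvJoin_concat (L : List (List Int)) (c sep : List Int) (hL : L ≠ []) :
    pvJoin (L ++ [c]) sep = pvJoin L sep ++ sep ++ c := by
  match L with
  | [] => exact absurd rfl hL
  | s0 :: rest =>
    show ((rest ++ [c]).foldl (fun out s => out ++ sep ++ s) s0)
        = pvJoin (s0 :: rest) sep ++ sep ++ c
    rw [List.foldl_append]
    rfl

theorem pvJoin_concat_append (M : List (List Int)) (c d sep : List Int) :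
    pvJoin (M ++ [c ++ d]) sep = pvJoin (M ++ [c]) sep ++ d := by
  match M with
  | [] => rfl
  | s0 :: rest =>
    rw [pvJoin_concat _ _ _ (by simp), pvJoin_concat _ _ _ (by simp)]
    simp [List.append_assoc]

-- B's split_on + join with expand computes the expand-only pass.
theorem pvSplitOn_join (byte : Int) (expand : List Int) (seq : List Int) :
    ∀ (acc : List (List Int) × List Int),
      (let st := seq.foldl
         (fun (s : List (List Int) × List Int) v =>
           if v = byte then (s.1 ++ [s.2], []) else (s.1, s.2 ++ [v]))
         acc
       pvJoin (st.1 ++ [st.2]) expand)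
      = pvJoin (acc.1 ++ [acc.2]) expand ++ pvExp byte expand seq := by
  induction seq with
  | nil => intro acc; simp [pvExp]
  | cons v rest ih =>
    intro acc
    simp only [List.foldl_cons]
    by_cases hv : v = byte
    · rw [if_pos hv]
      have := ih (acc.1 ++ [acc.2], [])
      simp only at this
      rw [this]
      have h2 : pvJoin ((acc.1 ++ [acc.2]) ++ [[]]) expand
          = pvJoin (acc.1 ++ [acc.2]) expand ++ expand := by
        rw [pvJoin_concat _ _ _ (by simp)]; simp
      rw [h2, hv]
      simp [pvExp, List.append_assoc]
    · rw [if_neg hv]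
      have := ih (acc.1, acc.2 ++ [v])
      simp only at this
      rw [this, pvJoin_concat_append]
      simp [pvExp, hv, List.append_assoc]

theorem pvSplitOn_join' (byte : Int) (expand seq : List Int) :
    pvJoin (pvSplitOn byte seq) expand = pvExp byte expand seq := by
  have := pvSplitOn_join byte expand seq ([], [])
  simpa [pvSplitOn] using this

-- reference recursion = expand-only pass when esc = byte or no pair occurs
theorem pvBGo_eq_exp (byte esc : Int) (expand : List Int) (seq : List Int)
    (h : esc = byte ∨ pvNoPair esc byte seq) :
    pvBGo byte esc expand seq = pvExp byte expand seq := by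
  induction seq with
  | nil => simp [pvBGo_nil, pvExp]
  | cons x rest ih =>
    by_cases hxb : x = byte
    · rw [hxb, pvBGo_byte]
      have : pvExp byte expand (byte :: rest) = expand ++ pvExp byte expand rest := by
        simp [pvExp]
      rw [this, ih (h.imp id (fun hp => pvNoPair_tail _ _ _ _ (hxb ▸ hp)))]
    · by_cases hxe : x = esc
      · have hne : esc ≠ byte := fun hh => hxb (hxe.trans hh)
        rcases h with h | h
        · exact absurd h hne
        · match rest with
          | [] =>
            rw [hxe, pvBGo_esc_nil _ _ _ hne]
            simp [pvExp, hne]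
          | y :: r' =>
            have hyb : y ≠ byte := by
              rw [hxe] at h
              intro hy; exact h.1 ⟨rfl, hy⟩
            rw [hxe, pvBGo_esc_other _ _ _ _ _ hne hyb,
                ih (Or.inr (pvNoPair_tail _ _ _ _ h))]
            simp [pvExp, hne]
      · rw [pvBGo_other _ _ _ _ _ hxb hxe]
        have : pvExp byte expand (x :: rest) = x :: pvExp byte expand rest := by
          simp [pvExp, hxb]
        rw [this, ih (h.imp id (pvNoPair_tail _ _ _ _))]

-- reference recursion across a leftmost pair
theorem pvBGo_split (byte esc : Int) (expand : List Int) (hne : esc ≠ byte) :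
    ∀ (s1 s2 : List Int), pvNoPair esc byte s1 →
      pvBGo byte esc expand (s1 ++ esc :: byte :: s2)
        = pvExp byte expand s1 ++ byte :: pvBGo byte esc expand s2 := by
  intro s1
  induction s1 with
  | nil => intro s2 _; rw [List.nil_append, pvBGo_esc_byte _ _ _ _ hne]; rfl
  | cons x r ih =>
    intro s2 hnp
    by_cases hxb : x = byte
    · rw [hxb, List.cons_append, pvBGo_byte, ih s2 (pvNoPair_tail _ _ _ _ (hxb ▸ hnp))]
      simp [pvExp, List.append_assoc]
    · by_cases hxe : x = esc
      · match r with
        | [] =>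
          rw [hxe]
          show pvBGo byte esc expand (esc :: esc :: byte :: s2) = _
          rw [pvBGo_esc_other _ _ _ _ _ hne hne, pvBGo_esc_byte _ _ _ _ hne]
          simp [pvExp, hne]
        | y :: r' =>
          have hyb : y ≠ byte := by
            rw [hxe] at hnp
            intro hy; exact hnp.1 ⟨rfl, hy⟩
          rw [hxe]
          show pvBGo byte esc expand (esc :: y :: (r' ++ esc :: byte :: s2)) = _
          rw [pvBGo_esc_other _ _ _ _ _ hne hyb,
              show (y :: (r' ++ esc :: byte :: s2)) = (y :: r') ++ esc :: byte :: s2 by simp,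
              ih s2 (pvNoPair_tail _ _ _ _ hnp)]
          simp [pvExp, hne]
      · rw [List.cons_append, pvBGo_other _ _ _ _ _ hxb hxe,
            ih s2 (pvNoPair_tail _ _ _ _ hnp)]
        simp [pvExp, hxb]

-- structural leftmost-pair search (proof-side mirror of B's find_pair/split_pairs)
def pvSearch (esc byte : Int) : List Int → Option (List Int × List Int)
  | [] => none
  | [_] => none
  | x :: y :: r =>
    if x = esc ∧ y = byte then some ([], r)
    else match pvSearch esc byte (y :: r) with
         | none => none
         | some (s1, s2) => some (x :: s1, s2)

theorem pvSearch_none (esc byte : Int) (seq : List Int)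
    (h : pvSearch esc byte seq = none) : pvNoPair esc byte seq := by
  match seq with
  | [] => trivial
  | [_] => trivial
  | x :: y :: r =>
    rw [pvSearch] at h
    by_cases hp : x = esc ∧ y = byte
    · rw [if_pos hp] at h; simp at h
    · rw [if_neg hp] at h
      refine ⟨hp, pvSearch_none esc byte (y :: r) ?_⟩
      cases hs : pvSearch esc byte (y :: r) with
      | none => rfl
      | some p => rw [hs] at h; cases p; simp at h

theorem pvSearch_some (esc byte : Int) (seq s1 s2 : List Int)
    (h : pvSearch esc byte seq = some (s1, s2)) :
    seq = s1 ++ esc :: byte :: s2 ∧ pvNoPair esc byte s1 := by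
  match seq with
  | [] => rw [pvSearch] at h; cases h
  | [_] => rw [pvSearch] at h; cases h
  | x :: y :: r =>
    rw [pvSearch] at h
    by_cases hp : x = esc ∧ y = byte
    · rw [if_pos hp] at h
      simp only [Option.some.injEq, Prod.mk.injEq] at h
      obtain ⟨h1, h2⟩ := h
      subst h1; subst h2
      exact ⟨by rw [hp.1, hp.2]; rfl, trivial⟩
    · rw [if_neg hp] at h
      cases hs : pvSearch esc byte (y :: r) with
      | none => rw [hs] at h; cases h
      | some p =>
        obtain ⟨t1, t2⟩ := p
        rw [hs] at h
        simp only [Option.some.injEq, Prod.mk.injEq] at h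
        obtain ⟨h1, h2⟩ := h
        obtain ⟨he, hn⟩ := pvSearch_some esc byte (y :: r) t1 t2 hs
        subst h1; subst h2
        refine ⟨by rw [List.cons_append, ← he], ?_⟩
        match t1, he with
        | [], _ => trivial
        | u :: t1', he =>
          rw [List.cons_append] at he
          have hyu : y = u := by injection he
          exact ⟨fun hc => hp ⟨hc.1, by rw [hyu]; exact hc.2⟩, hn⟩

theorem pvSearch_length (esc byte : Int) (seq s1 s2 : List Int)
    (h : pvSearch esc byte seq = some (s1, s2)) : s2.length + 2 ≤ seq.length := by
  have := (pvSearch_some esc byte seq s1 s2 h).1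
  rw [this]; simp

-- structural split_pairs (proof-side); B's fueled loop is proved equal to it
def pvSPRec (esc byte : Int) (seq : List Int) : List (List Int) :=
  match hs : pvSearch esc byte seq with
  | none => [seq]
  | some (s1, s2) => s1 :: pvSPRec esc byte s2
termination_by seq.length
decreasing_by
  have := pvSearch_length esc byte seq s1 s2 hs
  omega

-- B's find_pair computes the leftmost pair position described by pvSearch
theorem pvFindPairAux_spec (esc byte : Int) (seq : List Int) :
    ∀ (fuel i : Nat), seq.length ≤ fuel + i →
      (match pvSearch esc byte (seq.drop i) with
       | none => pvFindPairAux esc byte seq fuel i = -1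
       | some (s1, _) => pvFindPairAux esc byte seq fuel i = ((i : Int) + s1.length)) := by
  intro fuel
  induction fuel with
  | zero =>
    intro i h
    have hd : seq.drop i = [] := List.drop_eq_nil_of_le (by omega)
    rw [hd]
    rfl
  | succ n ih =>
    intro i h
    by_cases hlt : i + 1 < seq.length
    · have h1 : i < seq.length := by omega
      have hdrop : seq.drop i = seq[i] :: seq.drop (i+1) := List.drop_eq_getElem_cons h1
      have hdrop2 : seq.drop (i+1) = seq[i+1] :: seq.drop (i+2) := List.drop_eq_getElem_cons hlt
      have hgd1 : seq.getD i 0 = seq[i] := List.getD_eq_getElem _ _ h1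
      have hgd2 : seq.getD (i+1) 0 = seq[i+1] := List.getD_eq_getElem _ _ hlt
      rw [hdrop, hdrop2, pvSearch]
      by_cases hp : seq[i] = esc ∧ seq[i+1] = byte
      · rw [if_pos hp]
        show pvFindPairAux esc byte seq (n+1) i = ((i : Int) + ([] : List Int).length)
        rw [pvFindPairAux, if_pos hlt, if_pos (by rw [hgd1, hgd2]; exact hp)]
        simp
      · rw [if_neg hp]
        have ihh := ih (i+1) (by omega)
        rw [hdrop2] at ihh
        cases hs : pvSearch esc byte (seq[i+1] :: seq.drop (i+2)) with
        | none =>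
          rw [hs] at ihh
          rw [pvFindPairAux, if_pos hlt, if_neg (by rw [hgd1, hgd2]; exact hp)]
          exact ihh
        | some p =>
          obtain ⟨s1, s2⟩ := p
          rw [hs] at ihh
          show pvFindPairAux esc byte seq (n+1) i = ((i : Int) + (seq[i] :: s1).length)
          rw [pvFindPairAux, if_pos hlt, if_neg (by rw [hgd1, hgd2]; exact hp), ihh]
          simp; omega
    · have hd : pvSearch esc byte (seq.drop i) = none := by
        match hq : seq.drop i with
        | [] => rfl
        | [_] => rfl
        | a :: b :: r =>
          exfalso
          have : (seq.drop i).length = seq.length - i := List.length_drop ..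
          rw [hq] at this; simp at this; omega
      rw [hd, pvFindPairAux, if_neg hlt]

theorem pvSPRec_none (esc byte : Int) (seq : List Int) (hs : pvSearch esc byte seq = none) :
    pvSPRec esc byte seq = [seq] := by
  rw [pvSPRec.eq_def]
  split
  · rfl
  · rename_i s1 s2 heq
    rw [hs] at heq; cases heq

theorem pvSPRec_some (esc byte : Int) (seq s1 s2 : List Int)
    (hs : pvSearch esc byte seq = some (s1, s2)) :
    pvSPRec esc byte seq = s1 :: pvSPRec esc byte s2 := by
  rw [pvSPRec.eq_def]
  split
  · rename_i heq
    rw [hs] at heq; cases heq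
  · rename_i t1 t2 heq
    rw [hs] at heq
    simp only [Option.some.injEq, Prod.mk.injEq] at heq
    rw [heq.1, heq.2]

theorem pvSplitPairsAux_eq (esc byte : Int) :
    ∀ (fuel : Nat) (seq : List Int) (segs : List (List Int)), seq.length ≤ fuel →
      pvSplitPairsAux esc byte fuel seq segs = segs ++ pvSPRec esc byte seq := by
  intro fuel
  induction fuel with
  | zero =>
    intro seq segs h
    have : seq = [] := List.eq_nil_of_length_eq_zero (Nat.le_zero.mp h)
    subst this
    rw [pvSplitPairsAux, pvSPRec_none esc byte [] rfl]
  | succ n ih =>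
    intro seq segs h
    rw [pvSplitPairsAux]
    have hspec := pvFindPairAux_spec esc byte seq seq.length 0 (by omega)
    rw [List.drop_zero] at hspec
    cases hs : pvSearch esc byte seq with
    | none =>
      rw [hs] at hspec
      show (if pvFindPair esc byte seq < 0 then segs ++ [seq]
            else pvSplitPairsAux esc byte n (seq.drop ((pvFindPair esc byte seq).toNat + 2))
                   (segs ++ [seq.take (pvFindPair esc byte seq).toNat])) = _
      rw [show pvFindPair esc byte seq = -1 from hspec, if_pos (by norm_num),
          pvSPRec_none esc byte seq hs]
    | some p =>
      obtain ⟨s1, s2⟩ := p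
      rw [hs] at hspec
      obtain ⟨hseq, _⟩ := pvSearch_some esc byte seq s1 s2 hs
      have hi : pvFindPair esc byte seq = ((0 : Int) + s1.length) := hspec
      show (if pvFindPair esc byte seq < 0 then segs ++ [seq]
            else pvSplitPairsAux esc byte n (seq.drop ((pvFindPair esc byte seq).toNat + 2))
                   (segs ++ [seq.take (pvFindPair esc byte seq).toNat])) = _
      rw [hi, if_neg (by omega)]
      have htn : ((0 : Int) + (s1.length : Int)).toNat = s1.length := by simp
      rw [htn]
      have hdrop : seq.drop (s1.length + 2) = s2 := by
        rw [hseq]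
        rw [show s1.length + 2 = (s1 ++ [esc, byte]).length by simp,
            show s1 ++ esc :: byte :: s2 = (s1 ++ [esc, byte]) ++ s2 by simp]
        exact List.drop_left
      have htake : seq.take s1.length = s1 := by
        rw [hseq]; exact List.take_left
      rw [hdrop, htake]
      have hlen : s2.length ≤ n := by
        have := pvSearch_length esc byte seq s1 s2 hs
        omega
      rw [ih s2 (segs ++ [s1]) hlen, pvSPRec_some esc byte seq s1 s2 hs]
      simp

theorem pvSplitPairs_eq (esc byte : Int) (seq : List Int) :
    pvSplitPairs esc byte seq = pvSPRec esc byte seq := by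
  have := pvSplitPairsAux_eq esc byte seq.length seq [] (le_refl _)
  simpa [pvSplitPairs] using this

-- the reference recursion is the join of the per-segment expand-only passes
theorem pvBGo_eq_join (byte esc : Int) (expand : List Int) (hne : esc ≠ byte) :
    ∀ (seq : List Int),
      pvBGo byte esc expand seq
        = pvJoin ((pvSPRec esc byte seq).map (pvExp byte expand)) [byte] := by
  intro seq
  cases hs : pvSearch esc byte seq with
  | none =>
    rw [pvSPRec_none esc byte seq hs]
    rw [pvBGo_eq_exp byte esc expand seq (Or.inr (pvSearch_none esc byte seq hs))]
    rfl
  | some p =>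
    obtain ⟨s1, s2⟩ := p
    obtain ⟨hseq, hnp⟩ := pvSearch_some esc byte seq s1 s2 hs
    rw [pvSPRec_some esc byte seq s1 s2 hs, hseq,
        pvBGo_split byte esc expand hne s1 s2 hnp]
    have ih := pvBGo_eq_join byte esc expand hne s2
    rw [ih, List.map_cons]
    have hMne : (pvSPRec esc byte s2).map (pvExp byte expand) ≠ [] := by
      have : pvSPRec esc byte s2 ≠ [] := by
        cases hs2 : pvSearch esc byte s2 with
        | none => rw [pvSPRec_none esc byte s2 hs2]; simp
        | some q => obtain ⟨t1, t2⟩ := q; rw [pvSPRec_some esc byte s2 t1 t2 hs2]; simp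
      simpa using this
    rw [pvJoin_cons _ _ _ hMne]
    simp
termination_by seq => seq.length
decreasing_by
  have := pvSearch_length esc byte seq s1 s2 hs
  omega

-- B's subst computes the reference recursion
theorem pvSubst_eq_go (byte esc : Int) (seq expand : List Int) :
    pvSubst byte esc seq expand = pvBGo byte esc expand seq := by
  simp only [pvSubst]
  by_cases hne : esc ≠ byte
  · rw [if_pos hne, pvSplitPairs_eq, pvBGo_eq_join byte esc expand hne seq]
    congr 1
    exact List.map_congr_left (fun seg _ => pvSplitOn_join' byte expand seg)
  · rw [if_neg hne]
    have heq : esc = byte := not_ne_iff.mp hne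
    rw [show ([seq].map (fun seg => pvJoin (pvSplitOn byte seg) expand)) = [pvExp byte expand seq]
          from by simp [pvSplitOn_join'],
        pvJoin_singleton, pvBGo_eq_exp byte esc expand seq (Or.inl heq)]

-- A's preprocessing loop coincides with A's main loop run with rep = [byte] (esc ≠ byte).
theorem pvAPrep_eq_main (r : List Int) (byte esc : Int) (hne : esc ≠ byte) :
    ∀ (fuel index : Nat) (acc : List Int),
      pvAPrep r byte esc fuel index acc = pvAMain r byte [byte] esc fuel index acc := by
  intro fuel
  induction fuel with
  | zero => intro index acc; rfl
  | succ n ih =>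
    intro index acc
    rw [pvAPrep, pvAMain]
    by_cases hlt : index < r.length
    · rw [dif_pos hlt, dif_pos hlt]
      by_cases hxe : r[index] = esc
      · have hxb : ¬ r[index] = byte := by rw [hxe]; exact hne
        rw [if_pos hxe, if_neg hxb, if_pos hxe]
        cases hy : r[index+1]? with
        | none => rfl
        | some y =>
          dsimp only
          by_cases hyb : y = byte
          · rw [if_pos hyb, if_pos hyb, ih]
          · rw [if_neg hyb, if_neg hyb, ih]
      · by_cases hxb : r[index] = byte
        · rw [if_neg hxe, if_pos hxb]
          rw [show acc ++ [r[index]] = acc ++ [byte] from by rw [hxb], ih]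
        · rw [if_neg hxe, if_neg hxb, if_neg hxe, ih]
    · rw [dif_neg hlt, dif_neg hlt]

-- A's main loop computes the reference recursion, provided no dangling trailing escape.
theorem pvAMain_eq_go (page : List Int) (byte : Int) (rep : List Int) (esc : Int)
    (hpre : esc = byte ∨ page.getLast? ≠ some esc) :
    ∀ (fuel idx : Nat) (acc : List Int), page.length - idx ≤ fuel →
      pvAMain page byte rep esc fuel idx acc = acc ++ pvBGo byte esc rep (page.drop idx) := by
  intro fuel
  induction fuel with
  | zero =>
    intro idx acc h
    rw [pvAMain]
    simp [List.drop_eq_nil_of_le (by omega : page.length ≤ idx), pvBGo_nil]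
  | succ n ih =>
    intro idx acc h
    rw [pvAMain]
    by_cases hlt : idx < page.length
    · have hdrop : page.drop idx = page[idx] :: page.drop (idx+1) :=
        List.drop_eq_getElem_cons hlt
      rw [dif_pos hlt]
      by_cases hxb : page[idx] = byte
      · rw [if_pos hxb, ih (idx+1) (acc ++ rep) (by omega), hdrop, hxb, pvBGo_byte]
        simp [List.append_assoc]
      · by_cases hxe : page[idx] = esc
        · have hne : esc ≠ byte := fun hh => hxb (hxe.trans hh)
          rw [if_neg hxb, if_pos hxe]
          cases hy : page[idx+1]? with
          | none =>
            exfalso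
            have hidx : idx + 1 = page.length := by
              have := List.getElem?_eq_none_iff.mp hy
              omega
            have hlast : page.getLast? = some esc := by
              rw [List.getLast?_eq_getElem?]
              have hix : page.length - 1 = idx := by omega
              rw [hix, List.getElem?_eq_getElem hlt, hxe]
            rcases hpre with hpb | hpl
            · exact hne hpb
            · exact hpl hlast
          | some y =>
            dsimp only
            obtain ⟨hlt2, hyval⟩ : ∃ h : idx + 1 < page.length, page[idx+1] = y := by
              have := List.getElem?_eq_some_iff.mp hy
              exact ⟨this.choose, this.choose_spec⟩
            have hdrop2 : page.drop (idx+1) = page[idx+1] :: page.drop (idx+2) :=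
              List.drop_eq_getElem_cons hlt2
            by_cases hyb : y = byte
            · rw [if_pos hyb, ih (idx+2) (acc ++ [byte]) (by omega)]
              rw [hdrop, hdrop2, hxe, hyval, hyb, pvBGo_esc_byte _ _ _ _ hne]
              simp [List.append_assoc]
            · rw [if_neg hyb, ih (idx+1) (acc ++ [page[idx]]) (by omega)]
              rw [hdrop, hdrop2, hxe, hyval, pvBGo_esc_other _ _ _ _ _ hne hyb]
              simp [List.append_assoc]
        · rw [if_neg hxb, if_neg hxe, ih (idx+1) (acc ++ [page[idx]]) (by omega)]
          rw [hdrop, pvBGo_other _ _ _ _ _ hxb hxe, List.append_assoc]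
          rfl
    · rw [dif_neg hlt]
      simp [List.drop_eq_nil_of_le (by omega : page.length ≤ idx), pvBGo_nil]

-- ===== VERDICT (by name: the statement is the Claim_ definition above) =====
theorem replace_byte_spec : Claim_equal_replace_byte := by
  intro page byte replacement esc _hdom hpre
  obtain ⟨h1, h2⟩ := hpre
  unfold Spec_replace_byte replace_byte replace_byte_alt
  have hrep : (if esc ∈ replacement then pvAPrep replacement byte esc replacement.length 0 [] else replacement)
      = pvSubst byte esc replacement [byte] := by
    by_cases hmem : esc ∈ replacement
    · obtain ⟨hne, hlast⟩ := h1 hmem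
      rw [if_pos hmem, pvAPrep_eq_main replacement byte esc hne replacement.length 0 [],
          pvAMain_eq_go replacement byte [byte] esc (Or.inr hlast) replacement.length 0 [] (by omega),
          pvSubst_eq_go]
      simp
    · rw [if_neg hmem, pvSubst_eq_go, pvBGo_id byte esc replacement hmem]
  rw [hrep]
  rw [pvAMain_eq_go page byte (pvSubst byte esc replacement [byte]) esc h2 page.length 0 [] (by omega),
      pvSubst_eq_go byte esc page]
  simp

theorem replace_byte_raises : Claim_raises_replace_byte := by
  unfold Claim_raises_replace_byte
  constructor
  · intro page byte replacement esc _hdom hr hpre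
    obtain ⟨h1, h2⟩ := hpre
    rcases hr with ⟨heb, hodd⟩ | ⟨hne, hcase⟩
    · have ht : replacement.reverse.takeWhile (fun x => x == esc) ≠ [] := by
        intro hnil; rw [hnil] at hodd; simp at hodd
      obtain ⟨a, ha⟩ := List.exists_mem_of_ne_nil _ ht
      have hae : a = esc := by
        have := List.mem_takeWhile_imp ha
        simpa using this
      have hmem : esc ∈ replacement := by
        have := (List.takeWhile_sublist (fun x => x == esc)).mem ha
        rw [hae] at this
        exact List.mem_reverse.mp this
      exact (h1 hmem).1 heb
    · rcases hcase with hp | ⟨hmem, hl⟩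
      · rcases h2 with h | h
        · exact hne h
        · exact h hp
      · exact (h1 hmem).2 hl
  · refine ⟨by decide, by decide, by decide⟩

-- Self-check that the raise witness really lies inside Raises_ and B's port returns the stated value there.
theorem pvRaiseWitness_replace_byte_ok :
    Raises_replace_byte [7, 99] 5 [1] 99 ∧ replace_byte_alt [7, 99] 5 [1] 99 = [7, 99] :=
  ⟨replace_byte_raises.2.2.1, replace_byte_raises.2.2.2⟩
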